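-- pv_equiv track=rewrite | github.com/misterblonde/GraKelTest | GraphKernels-ysig.py | label_maker
-- ===== SOURCE A (Python) =====
-- def label_maker(n_atoms,shell_size, c_end):
--     """
--     Generate Hydrocarbon Node labels for GraKel library
--     """
--     node_labels = {}
--     atom_no =0
--     for n_mols in range(0, shell_size):
--
--         for i in range(0,n_atoms):
--
--             if i < c_end:
--                 node_labels[atom_no]= 'C'
--
--             else:
--                 node_labels[atom_no] = 'H'
--
--             atom_no += 1
--
--
--     return node_labels
-- ===== SOURCE B (Python) =====
-- def label_maker(n_atoms, shell_size, c_end):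
--     """
--     Generate Hydrocarbon Node labels for GraKel library
--     """
--     if n_atoms <= 0:
--         return {}
--     total = n_atoms * max(shell_size, 0)
--     return {k: ('C' if k % n_atoms < c_end else 'H') for k in range(total)}
-- ===== Notes on version B (the rewrite author's own statement) =====
-- stated objective: alternative
-- what changed: Replaces the nested shell/atom loops with a running atom_no counter by one flat comprehension over the total atom count, computing each atom's position within its shell by modular arithmetic (k % n_atoms) instead of iterating shells.
import Mathlib
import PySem

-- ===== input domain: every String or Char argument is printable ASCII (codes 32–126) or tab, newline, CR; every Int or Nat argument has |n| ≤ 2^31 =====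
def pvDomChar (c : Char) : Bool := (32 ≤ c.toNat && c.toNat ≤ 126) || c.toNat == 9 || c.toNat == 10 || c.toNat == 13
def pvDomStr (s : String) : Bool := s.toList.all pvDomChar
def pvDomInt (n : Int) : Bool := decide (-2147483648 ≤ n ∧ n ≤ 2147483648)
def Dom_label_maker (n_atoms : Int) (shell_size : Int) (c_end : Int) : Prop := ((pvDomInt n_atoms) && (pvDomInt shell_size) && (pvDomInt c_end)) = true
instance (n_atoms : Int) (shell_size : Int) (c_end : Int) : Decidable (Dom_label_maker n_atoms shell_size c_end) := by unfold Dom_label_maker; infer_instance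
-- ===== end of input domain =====

-- B labels each atom by one flat pass over the total atom count, deriving the in-shell
-- position by modular arithmetic instead of A's nested loops with a running counter
-- (objective: alternative decomposition, same cost).


-- ===== PORT A =====
-- nested loops: outer over shells, inner over atoms, dict keyed by a running atom_no counter
def label_maker (n_atoms : Int) (shell_size : Int) (c_end : Int) : List (Int × String) :=
  let final := (PySem.List.pyRange 0 shell_size 1).foldl
    (fun (st : PySem.Dict Int String × Int) _n_mols =>
      (PySem.List.pyRange 0 n_atoms 1).foldl
        (fun (st : PySem.Dict Int String × Int) i =>
          let d := if i < c_end then st.1.insert st.2 "C" else st.1.insert st.2 "H"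
          (d, st.2 + 1))
        st)
    (PySem.Dict.empty, 0)
  final.1.items

-- ===== PORT B =====
-- one flat dict comprehension over range(total); the in-shell position of atom k is
-- k % n_atoms; the comprehension's fresh distinct keys 0,1,2,… make the dict this map
def label_maker_alt (n_atoms : Int) (shell_size : Int) (c_end : Int) : List (Int × String) :=
  if n_atoms ≤ 0 then []
  else
    let total := n_atoms * max shell_size 0
    (PySem.List.pyRange 0 total 1).map
      (fun k => (k, if PySem.Int.mod k n_atoms < c_end then "C" else "H"))

-- ===== PRECONDITION & SPEC =====
def Spec_label_maker (n_atoms : Int) (shell_size : Int) (c_end : Int) (out : List (Int × String)) : Prop := out = label_maker_alt n_atoms shell_size c_end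
instance (n_atoms : Int) (shell_size : Int) (c_end : Int) (out : List (Int × String)) : Decidable (Spec_label_maker n_atoms shell_size c_end out) := by unfold Spec_label_maker; infer_instance

-- ===== CLAIM (what is proved, stated in full; the proofs are below) =====
def Claim_equal_label_maker : Prop := ∀ (n_atoms : Int) (shell_size : Int) (c_end : Int), Dom_label_maker n_atoms shell_size c_end → Spec_label_maker n_atoms shell_size c_end (label_maker n_atoms shell_size c_end)

-- ===== LEMMAS AND PROOFS =====

-- the inner (per-shell) loop appends exactly the enumerated labelled pattern
theorem lm_inner (c_end : Int) (xs : List Int) (d : PySem.Dict Int String) (c : Int)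
    (h : ∀ k ∈ d.keys, k < c) :
    (xs.foldl
      (fun (st : PySem.Dict Int String × Int) i =>
        ((if i < c_end then st.1.insert st.2 "C" else st.1.insert st.2 "H"), st.2 + 1))
      (d, c)).1.items
      = d.items ++ PySem.List.enumerate (xs.map (fun i => if i < c_end then "C" else "H")) c
    ∧ (xs.foldl
      (fun (st : PySem.Dict Int String × Int) i =>
        ((if i < c_end then st.1.insert st.2 "C" else st.1.insert st.2 "H"), st.2 + 1))
      (d, c)).2 = c + xs.length
    ∧ ∀ k ∈ (xs.foldl
      (fun (st : PySem.Dict Int String × Int) i =>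
        ((if i < c_end then st.1.insert st.2 "C" else st.1.insert st.2 "H"), st.2 + 1))
      (d, c)).1.keys,
        k < (xs.foldl
          (fun (st : PySem.Dict Int String × Int) i =>
            ((if i < c_end then st.1.insert st.2 "C" else st.1.insert st.2 "H"), st.2 + 1))
          (d, c)).2 := by
  induction xs generalizing d c with
  | nil => simpa using h
  | cons x xs ih =>
    have hne : d.contains c = false := by
      by_contra hc
      have := (PySem.Dict.contains_iff_mem_keys d c).mp (by
        cases hb : d.contains c with
        | true => rfl
        | false => exact absurd hb hc)
      exact absurd (h c this) (by omega)
    have hins : (if x < c_end then d.insert c "C" else d.insert c "H")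
        = d.insert c (if x < c_end then "C" else "H") := by
      split <;> rfl
    have hkeys : ∀ k ∈ (d.insert c (if x < c_end then "C" else "H")).keys, k < c + 1 := by
      intro k hk
      rcases (PySem.Dict.mem_keys_insert d c k _).mp hk with h1 | h1
      · omega
      · have := h k h1; omega
    have hitems := PySem.Dict.items_insert_of_not_contains d
      (k := c) (if x < c_end then "C" else "H") hne
    obtain ⟨i1, i2, i3⟩ := ih (d.insert c (if x < c_end then "C" else "H")) (c + 1) hkeys
    refine ⟨?_, ?_, ?_⟩
    · simp only [List.foldl_cons, hins, i1, hitems, PySem.List.enumerate, List.map_cons]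
      simp
    · simp only [List.foldl_cons, hins, i2, List.length_cons]; push_cast; omega
    · simpa only [List.foldl_cons, hins] using i3

-- the outer loop appends the tiled enumerated pattern
theorem lm_outer (n_atoms c_end : Int) (L : List Int) (d : PySem.Dict Int String) (c : Int)
    (h : ∀ k ∈ d.keys, k < c) :
    (L.foldl
      (fun (st : PySem.Dict Int String × Int) _ =>
        (PySem.List.pyRange 0 n_atoms 1).foldl
          (fun (st : PySem.Dict Int String × Int) i =>
            ((if i < c_end then st.1.insert st.2 "C" else st.1.insert st.2 "H"), st.2 + 1))
          st)
      (d, c)).1.items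
      = d.items ++ PySem.List.enumerate
          ((List.replicate L.length
            ((PySem.List.pyRange 0 n_atoms 1).map (fun i => if i < c_end then "C" else "H"))).flatten) c
    ∧ ∀ k ∈ (L.foldl
      (fun (st : PySem.Dict Int String × Int) _ =>
        (PySem.List.pyRange 0 n_atoms 1).foldl
          (fun (st : PySem.Dict Int String × Int) i =>
            ((if i < c_end then st.1.insert st.2 "C" else st.1.insert st.2 "H"), st.2 + 1))
          st)
      (d, c)).1.keys,
        k < (L.foldl
          (fun (st : PySem.Dict Int String × Int) _ =>
            (PySem.List.pyRange 0 n_atoms 1).foldl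
              (fun (st : PySem.Dict Int String × Int) i =>
                ((if i < c_end then st.1.insert st.2 "C" else st.1.insert st.2 "H"), st.2 + 1))
              st)
          (d, c)).2 := by
  induction L generalizing d c with
  | nil => simpa using h
  | cons y L ih =>
    obtain ⟨i1, i2, i3⟩ := lm_inner c_end (PySem.List.pyRange 0 n_atoms 1) d c h
    set st1 := (PySem.List.pyRange 0 n_atoms 1).foldl
      (fun (st : PySem.Dict Int String × Int) i =>
        ((if i < c_end then st.1.insert st.2 "C" else st.1.insert st.2 "H"), st.2 + 1))
      (d, c) with hst1
    obtain ⟨o1, o3⟩ := ih st1.1 st1.2 i3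
    have hst1pair : st1 = (st1.1, st1.2) := rfl
    refine ⟨?_, ?_⟩
    · rw [List.foldl_cons, ← hst1, hst1pair] at *
      rw [o1, i1]
      simp only [List.length_cons, List.replicate_succ, List.flatten_cons,
        PySem.List.enumerate_append, List.length_map]
      rw [List.append_assoc, i2]
    · rw [List.foldl_cons, ← hst1, hst1pair]
      exact o3

theorem lm_len_pyRange (m : Int) : (PySem.List.pyRange 0 m 1).length = m.toNat := by
  simp [PySem.List.pyRange]
  omega

-- enumerate of a mapped range is the range of shifted pairs
theorem lm_enumerate_map_range {α : Type} (h : Nat → α) (m : Nat) (s : Int) :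
    PySem.List.enumerate ((List.range m).map h) s
      = (List.range m).map (fun (j : Nat) => (s + (j : Int), h j)) := by
  induction m generalizing s with
  | zero => simp [PySem.List.enumerate_nil]
  | succ m ih =>
    rw [List.range_succ, List.map_append, PySem.List.enumerate_append, ih]
    simp [PySem.List.enumerate]

-- tiling: the enumeration of s copies of the unit pattern is the mod-indexed flat range
theorem lm_tile {α : Type} (h : Nat → α) (n : Nat) (s : Nat) (c : Nat) :
    PySem.List.enumerate ((List.replicate s ((List.range n).map h)).flatten) ((n * c : Nat) : Int)
      = (List.range' (n * c) (n * s)).map (fun (k : Nat) => ((k : Int), h (k % n))) := by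
  induction s generalizing c with
  | zero => simp [PySem.List.enumerate_nil]
  | succ s ih =>
    rw [List.replicate_succ, List.flatten_cons, PySem.List.enumerate_append]
    have hlen : ((List.range n).map h).length = n := by simp
    have hshift : ((n * c : Nat) : Int) + (((List.range n).map h).length : Int)
        = ((n * (c + 1) : Nat) : Int) := by
      rw [hlen]; push_cast; ring
    rw [hshift, ih (c + 1)]
    have hsplit : List.range' (n * c) (n * (s + 1))
        = List.range' (n * c) n ++ List.range' (n * c + n) (n * s) := by
      have h1 : n * (s + 1) = n + n * s := by ring
      rw [h1, ← List.range'_append]; simp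
    rw [hsplit, List.map_append]
    congr 1
    rw [lm_enumerate_map_range, List.range'_eq_map_range, List.map_map]
    refine List.map_congr_left ?_
    intro j hj
    have hj' : j < n := List.mem_range.mp hj
    have hm : (n * c + j) % n = j := by
      rw [Nat.mul_add_mod]
      exact Nat.mod_eq_of_lt hj'
    simp only [Function.comp, hm, Prod.mk.injEq]
    exact ⟨by push_cast; ring, trivial⟩

-- ===== VERDICT (by name: the statement is the Claim_ definition above) =====
theorem label_maker_spec : Claim_equal_label_maker := by
  intro n_atoms shell_size c_end _
  unfold Spec_label_maker label_maker label_maker_alt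
  obtain ⟨o1, _⟩ := lm_outer n_atoms c_end (PySem.List.pyRange 0 shell_size 1)
    PySem.Dict.empty 0 (by simp [PySem.Dict.keys_empty])
  simp only [o1, lm_len_pyRange]
  by_cases hn : n_atoms ≤ 0
  · have hnil : (PySem.List.pyRange 0 n_atoms 1) = [] := by
      apply PySem.List.pyRange_one_eq_nil; omega
    rw [if_pos hn, hnil]
    have hflat : (List.replicate shell_size.toNat ([] : List String)).flatten = [] := by simp
    simp only [List.map_nil, hflat, PySem.List.enumerate_nil, List.append_nil]
    rfl
  · simp only [if_neg hn]
    have hn' : 0 < n_atoms := by omega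
    have hunit : (PySem.List.pyRange 0 n_atoms 1).map (fun i => if i < c_end then "C" else "H")
        = (List.range n_atoms.toNat).map (fun (j : Nat) => if (j : Int) < c_end then "C" else "H") := by
      rw [PySem.List.pyRange_one]
      simp only [Int.sub_zero, List.map_map]
      refine List.map_congr_left ?_
      intro j _
      simp [Function.comp]
    rw [hunit]
    have htile := lm_tile (fun (j : Nat) => if (j : Int) < c_end then "C" else "H")
      n_atoms.toNat shell_size.toNat 0
    simp only [Nat.mul_zero, Nat.cast_zero] at htile
    rw [htile]
    have htot : (n_atoms * max shell_size 0 - 0).toNat = n_atoms.toNat * shell_size.toNat := by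
      rcases le_or_gt shell_size 0 with hs | hs
      · have hmax : max shell_size 0 = 0 := by omega
        have hz : shell_size.toNat = 0 := by omega
        simp [hmax, hz]
      · have hmax : max shell_size 0 = shell_size := by omega
        have e1 : n_atoms = (n_atoms.toNat : Int) := by omega
        have e2 : shell_size = (shell_size.toNat : Int) := by omega
        rw [Int.sub_zero, hmax]
        conv_lhs => rw [e1, e2]
        rw [← Nat.cast_mul, Int.toNat_natCast]
    rw [PySem.List.pyRange_one, htot, List.map_map, List.range'_eq_map_range, List.map_map]
    have hemp : (PySem.Dict.empty : PySem.Dict Int String).items = [] := rfl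
    rw [hemp, List.nil_append]
    refine List.map_congr_left ?_
    intro k hk
    have hcast : n_atoms = (n_atoms.toNat : Int) := by omega
    have hmod : PySem.Int.mod ((k : Int)) n_atoms = (((k % n_atoms.toNat : Nat)) : Int) := by
      rw [hcast]
      exact PySem.Int.mod_natCast k n_atoms.toNat
    simp only [Function.comp, Nat.zero_add, Int.zero_add, hmod]
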